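-- pv_equiv track=rewrite | github.com/RAVEENRAJC/medrag | medrag-fixed.py | chunk_report
-- ===== SOURCE A (Python) =====
-- def chunk_report(report: str) -> list:
--     """Split report into meaningful chunks"""
--     lines = [l.strip() for l in report.split("\n") if l.strip()]
--     chunks, current = [], []
--     for line in lines:
--         current.append(line)
--         if len(current) >= 5:
--             chunks.append("\n".join(current))
--             current = []
--     if current:
--         chunks.append("\n".join(current))
--     return chunks if chunks else [report]
-- ===== SOURCE B (Python) =====
-- def chunk_report(report: str) -> list:
--     """Split report into meaningful chunks"""
--     lines = [s for s in map(str.strip, report.split("\n")) if s]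
--     chunks = ["\n".join(lines[i:i + 5]) for i in range(0, len(lines), 5)]
--     return chunks if chunks else [report]
-- ===== Notes on version B (the rewrite author's own statement) =====
-- stated objective: simpler
-- what changed: replaces the running-buffer accumulator loop with its length test and post-loop flush by index-strided slicing: chunks are built directly as joins of lines[i:i+5] for i in range(0, len(lines), 5)
import Mathlib
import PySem

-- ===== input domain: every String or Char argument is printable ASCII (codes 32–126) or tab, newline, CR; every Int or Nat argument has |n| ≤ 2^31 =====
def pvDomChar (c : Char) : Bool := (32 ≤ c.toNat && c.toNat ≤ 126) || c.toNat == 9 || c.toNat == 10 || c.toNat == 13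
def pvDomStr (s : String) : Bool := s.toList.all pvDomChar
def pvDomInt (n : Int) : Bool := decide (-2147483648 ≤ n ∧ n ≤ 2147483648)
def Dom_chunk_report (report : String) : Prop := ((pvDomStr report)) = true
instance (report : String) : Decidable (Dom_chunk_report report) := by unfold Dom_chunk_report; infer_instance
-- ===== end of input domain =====

-- B replaces A's running-buffer loop (with its length test and post-loop flush) by
-- index-strided slicing lines[i:i+5] over range(0, len, 5); same cost, simpler shape.

-- ===== PORT A =====
-- the body of A's for-loop: append the line to `current`, flush on length ≥ 5
def chunkStep (st : List String × List String) (line : String) : List String × List String :=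
  let current := st.2 ++ [line]
  if 5 ≤ current.length then (st.1 ++ [PySem.Str.join "\n" current], [])
  else (st.1, current)

def chunk_report (report : String) : List String :=
  -- [l.strip() for l in report.split("\n") if l.strip()]  (split? is some: sep "\n" ≠ "")
  let lines := (((PySem.Str.split? report "\n").getD []).filter
      (fun l => PySem.Str.strip l != "")).map PySem.Str.strip
  let st := lines.foldl chunkStep ([], [])
  let chunks := if st.2 ≠ [] then st.1 ++ [PySem.Str.join "\n" st.2] else st.1
  if chunks ≠ [] then chunks else [report]

-- ===== PORT B =====
def chunk_report_alt (report : String) : List String :=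
  -- lines = [s for s in map(str.strip, report.split("\n")) if s]
  let lines := (((PySem.Str.split? report "\n").getD []).map PySem.Str.strip).filter
      (fun s => s != "")
  -- ["\n".join(lines[i:i+5]) for i in range(0, len(lines), 5)]
  let chunks := (PySem.List.pyRange 0 lines.length 5).map
      (fun i => PySem.Str.join "\n" (PySem.List.slice lines (some i) (some (i + 5))))
  if chunks ≠ [] then chunks else [report]

-- ===== PRECONDITION & SPEC =====
def Spec_chunk_report (report : String) (out : List String) : Prop := out = chunk_report_alt report
instance (report : String) (out : List String) : Decidable (Spec_chunk_report report out) := by unfold Spec_chunk_report; infer_instance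

-- ===== CLAIM (what is proved, stated in full; the proofs are below) =====
def Claim_equal_chunk_report : Prop := ∀ (report : String), Dom_chunk_report report → Spec_chunk_report report (chunk_report report)

-- ===== LEMMAS AND PROOFS =====

-- reference chunking: successive groups of five, joined
def chunksOf (ls : List String) : List String :=
  if ls = [] then [] else
    PySem.Str.join "\n" (ls.take 5) :: chunksOf (ls.drop 5)
termination_by ls.length
decreasing_by
  have h1 : 0 < ls.length := List.length_pos_of_ne_nil (by assumption)
  simp [List.length_drop]
  omega

lemma chunkStep_short (ls : List String) (h : ls.length < 5) (acc : List String) :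
    ls.foldl chunkStep (acc, []) = (acc, ls) := by
  rcases ls with _ | ⟨a, _ | ⟨b, _ | ⟨c, _ | ⟨d, _ | ⟨e, t⟩⟩⟩⟩⟩
  · rfl
  · simp [chunkStep, List.foldl]
  · simp [chunkStep, List.foldl]
  · simp [chunkStep, List.foldl]
  · simp [chunkStep, List.foldl]
  · exfalso; simp at h; omega

lemma chunkStep_block (a b c d e : String) (t acc : List String) :
    (a :: b :: c :: d :: e :: t).foldl chunkStep (acc, []) =
      t.foldl chunkStep (acc ++ [PySem.Str.join "\n" [a, b, c, d, e]], []) := by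
  simp [chunkStep, List.foldl]

-- A's loop followed by the flush equals the reference chunking, for any accumulator
lemma loop_eq_chunksOf : ∀ (n : Nat) (ls : List String), ls.length ≤ n → ∀ (acc : List String),
    (let st := ls.foldl chunkStep (acc, [])
     if st.2 ≠ [] then st.1 ++ [PySem.Str.join "\n" st.2] else st.1) = acc ++ chunksOf ls := by
  intro n
  induction n with
  | zero =>
    intro ls h acc
    have : ls = [] := by cases ls <;> simp_all
    subst this
    simp [List.foldl, chunksOf]
  | succ m ih =>
    intro ls h acc
    by_cases h5 : 5 ≤ ls.length
    · rcases ls with _ | ⟨a, _ | ⟨b, _ | ⟨c, _ | ⟨d, _ | ⟨e, t⟩⟩⟩⟩⟩ <;> simp at h5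
      rw [chunkStep_block]
      have ht : t.length ≤ m := by simp at h; omega
      have := ih t ht (acc ++ [PySem.Str.join "\n" [a, b, c, d, e]])
      simp only [this]
      conv_rhs => rw [chunksOf]
      simp [List.append_assoc]
    · have h5' : ls.length < 5 := by omega
      rw [chunkStep_short ls h5' acc]
      by_cases hnil : ls = []
      · subst hnil; simp [chunksOf]
      · rw [chunksOf]
        have htk : ls.take 5 = ls := List.take_of_length_le (by omega)
        have hdp : ls.drop 5 = [] := List.drop_eq_nil_of_le (by omega)
        simp [hnil, htk, hdp, chunksOf]

-- the stride-5 range as a Nat range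
lemma pyRange_stride (len : Nat) :
    PySem.List.pyRange 0 (len : Int) 5 =
      (List.range ((len + 4) / 5)).map (fun k => ((5 * k : Nat) : Int)) := by
  rw [PySem.List.pyRange_of_pos 0 (len : Int) (by norm_num)]
  by_cases h : (0 : Int) < (len : Int)
  · simp only [if_pos h]
    have hcnt : (((len : Int) - 0 + 5 - 1) / 5).toNat = (len + 4) / 5 := by omega
    rw [hcnt]
    apply List.map_congr_left
    intro k _
    push_cast; ring
  · have hl : len = 0 := by omega
    subst hl
    simp

-- B's strided-slice comprehension equals the reference chunking
lemma slices_eq_chunksOf : ∀ (n : Nat) (ls : List String), ls.length ≤ n →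
    (PySem.List.pyRange 0 (ls.length : Int) 5).map
      (fun i => PySem.Str.join "\n" (PySem.List.slice ls (some i) (some (i + 5)))) =
      chunksOf ls := by
  intro n
  induction n with
  | zero =>
    intro ls h
    have : ls = [] := by cases ls <;> simp_all
    subst this
    rw [pyRange_stride]
    simp [chunksOf]
  | succ m ih =>
    intro ls h
    by_cases hnil : ls = []
    · subst hnil
      rw [pyRange_stride]
      simp [chunksOf]
    · rw [pyRange_stride, chunksOf, if_neg hnil]
      have hlen : 1 ≤ ls.length := by
        cases ls with | nil => simp_all | cons a t => simp
      have hm : (ls.length + 4) / 5 = ((ls.length - 5) + 4) / 5 + 1 := by omega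
      rw [hm, List.range_succ_eq_map]
      simp only [List.map_cons, List.map_map]
      rw [List.cons_eq_cons]
      refine ⟨?_, ?_⟩
      · -- head: lines[0:5]
        have : PySem.List.slice ls (some ((5 * 0 : Nat) : Int)) (some (((5 * 0 : Nat) : Int) + 5)) =
            (ls.drop 0).take 5 := by
          have := PySem.List.slice_natCast_add ls 0 5
          simpa using this
        simpa using congrArg (PySem.Str.join "\n") this
      · -- tail: lines[5(k+1) : 5(k+1)+5] = (drop 5 lines)[5k : 5k+5]
        have hrec := ih (ls.drop 5) (by simp; omega)
        rw [pyRange_stride] at hrec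
        have hlen5 : (ls.drop 5).length = ls.length - 5 := by simp
        rw [hlen5] at hrec
        rw [← hrec, List.map_map]
        apply List.map_congr_left
        intro k _
        simp only [Function.comp, Nat.succ_eq_add_one]
        congr 1
        have h1 : PySem.List.slice ls (some ((5 * (k + 1) : Nat) : Int))
            (some (((5 * (k + 1) : Nat) : Int) + 5)) = (ls.drop (5 * (k + 1))).take 5 := by
          have := PySem.List.slice_natCast_add ls (5 * (k + 1)) 5
          simpa using this
        have h2 : PySem.List.slice (ls.drop 5) (some ((5 * k : Nat) : Int))
            (some (((5 * k : Nat) : Int) + 5)) = ((ls.drop 5).drop (5 * k)).take 5 := by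
          have := PySem.List.slice_natCast_add (ls.drop 5) (5 * k) 5
          simpa using this
        have hcast : ((5 * (k + 1) : Nat) : Int) = ((5 * k : Nat) : Int) + 5 := by push_cast; ring
        rw [hcast] at h1 ⊢
        rw [h1, h2, List.drop_drop]
        congr 2
        omega

-- the two list-comprehension readings of `lines` agree
lemma lines_eq (xs : List String) :
    (xs.filter (fun l => PySem.Str.strip l != "")).map PySem.Str.strip =
      (xs.map PySem.Str.strip).filter (fun s => s != "") := by
  rw [List.filter_map]
  rfl

-- ===== VERDICT (by name: the statement is the Claim_ definition above) =====
theorem chunk_report_spec : Claim_equal_chunk_report := by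
  intro report _
  unfold Spec_chunk_report chunk_report chunk_report_alt
  dsimp only
  rw [lines_eq]
  set ls := ((((PySem.Str.split? report "\n").getD []).map PySem.Str.strip).filter
      (fun s => s != ""))
  have hA := loop_eq_chunksOf ls.length ls (le_refl _) []
  have hB := slices_eq_chunksOf ls.length ls (le_refl _)
  simp only at hA
  rw [hA, hB]
  simp
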